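-- pv_equiv track=rewrite | github.com/ramuuns/aoc | 2024/day20.py | find_cheats_by_time_20
-- ===== SOURCE A (Python) =====
-- from collections import defaultdict, deque
--
-- def find_cheats_by_time_20(grid,path):
--     cheats_by_time = defaultdict(int)
--     points = list(path.keys())
--     pd_points = defaultdict(lambda: defaultdict(list))
--     for i, p in enumerate(points[:-1]):
--         for p2 in points[i+1:]:
--             x1, y1 = p
--             x2, y2 = p2
--             md = abs(x2 - x1) + abs(y2 - y1)
--             pd_points[p][md].append(p2)
--             pd_points[p2][md].append(p)
--     for p, t in path.items():
--         ff_cheats(p, path, cheats_by_time, pd_points)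
--         #floodfill_cheats(p, 0, t, grid, path, cheats_by_time)
--     return cheats_by_time
--
-- def ff_cheats(s, path, cheats, points_map):
--     x,y = s
--     for d in range(1,21):
--         for p in points_map[s][d]:
--             if path[s] + d < path[p]:
--                 cheats[path[p] - path[s] - d] += 1
-- ===== SOURCE B (Python) =====
-- def find_cheats_by_time_20(grid, path):
--     # Per-point bucketing: for each start point one pass over the points buckets
--     # everything within Manhattan distance 20 into 21 small distance buckets, then
--     # the buckets are read off in distance order.  No global all-pairs distance map.
--     cheats = {}
--     points = list(path.keys())
--     for s in points:
--         ts = path[s]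
--         buckets = [[] for _ in range(21)]
--         for p in points:
--             md = abs(p[0] - s[0]) + abs(p[1] - s[1])
--             if p != s and md <= 20:
--                 buckets[md].append(p)
--         for d in range(1, 21):
--             for p in buckets[d]:
--                 tp = path[p]
--                 if ts + d < tp:
--                     delta = tp - ts - d
--                     cheats[delta] = cheats.get(delta, 0) + 1
--     return cheats
-- ===== Notes on version B (the rewrite author's own statement) =====
-- stated objective: alternative
-- what changed: Replaces A's global all-pairs nested-defaultdict distance map (built over every pair of path points) with a per-start-point single pass that drops only the points within Manhattan distance 20 into a 21-slot bucket array and reads the buckets off in distance order.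
import Mathlib
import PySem

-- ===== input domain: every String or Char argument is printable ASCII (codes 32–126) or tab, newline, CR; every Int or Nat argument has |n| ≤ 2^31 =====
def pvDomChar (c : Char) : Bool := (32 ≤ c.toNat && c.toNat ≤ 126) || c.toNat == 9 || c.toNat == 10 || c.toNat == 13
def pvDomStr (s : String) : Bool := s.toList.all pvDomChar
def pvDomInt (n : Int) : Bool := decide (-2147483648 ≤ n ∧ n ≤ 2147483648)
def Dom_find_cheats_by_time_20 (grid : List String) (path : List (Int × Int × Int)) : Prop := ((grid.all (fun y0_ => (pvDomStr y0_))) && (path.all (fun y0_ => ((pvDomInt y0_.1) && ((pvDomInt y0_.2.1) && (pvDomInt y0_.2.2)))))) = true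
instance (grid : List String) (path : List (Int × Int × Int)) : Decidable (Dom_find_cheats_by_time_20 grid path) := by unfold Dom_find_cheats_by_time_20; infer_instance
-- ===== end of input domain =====

-- B replaces A's global all-pairs nested-defaultdict distance map by a per-start-point
-- single pass into a 21-slot distance-bucket array (points farther than 20 are dropped):
-- a different decomposition of the same quadratic task, without the all-pairs map.

-- ===== PORT A =====
-- the dict argument 'path' arrives as an association list; both Pythons receive it as a dict
def pvPathDict (path : List (Int × Int × Int)) : PySem.Dict (Int × Int) Int :=
  PySem.Dict.ofList (path.map (fun t => ((t.1, t.2.1), t.2.2)))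

-- pd_points[a][md].append(q) on a defaultdict(lambda: defaultdict(list))
def pvPdAdd (pd : PySem.Dict (Int × Int) (PySem.Dict Int (List (Int × Int))))
    (a : Int × Int) (md : Int) (q : Int × Int) :
    PySem.Dict (Int × Int) (PySem.Dict Int (List (Int × Int))) :=
  pd.modify a PySem.Dict.empty (fun inner => inner.modify md [] (fun l => l ++ [q]))

-- 'for i, p in enumerate(points[:-1]): for p2 in points[i+1:]' ported as structural
-- recursion over suffixes: points[i+1:] is exactly the tail after points[i], and the
-- last point (dropped by points[:-1]) has an empty tail, so this is exact.
def pvBuildPd : List (Int × Int) → PySem.Dict (Int × Int) (PySem.Dict Int (List (Int × Int))) →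
    PySem.Dict (Int × Int) (PySem.Dict Int (List (Int × Int)))
  | [], pd => pd
  | p :: rest, pd =>
      pvBuildPd rest (rest.foldl (fun pd p2 =>
        pvPdAdd (pvPdAdd pd p (|p2.1 - p.1| + |p2.2 - p.2|) p2)
                p2 (|p2.1 - p.1| + |p2.2 - p.2|) p) pd)

-- ff_cheats: path[s]/path[p] are always present (s and p are keys of path), so getD is
-- value-exact; the defaultdict reads points_map[s][d] only insert empty defaults into
-- pd_points, which is never returned, so getD with the default is exact here too.
def pvFfCheats (s : Int × Int) (pathD : PySem.Dict (Int × Int) Int)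
    (cheats : PySem.Dict Int Int)
    (pointsMap : PySem.Dict (Int × Int) (PySem.Dict Int (List (Int × Int)))) :
    PySem.Dict Int Int :=
  (PySem.List.pyRange 1 21 1).foldl (fun cheats d =>
    ((pointsMap.getD s PySem.Dict.empty).getD d []).foldl (fun cheats p =>
      if pathD.getD s 0 + d < pathD.getD p 0 then
        cheats.modify (pathD.getD p 0 - pathD.getD s 0 - d) 0 (· + 1)
      else cheats) cheats) cheats

def find_cheats_by_time_20 (grid : List String) (path : List (Int × Int × Int)) : List (Int × Int) :=
  let pathD := pvPathDict path
  let points := pathD.keys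
  let pdPoints := pvBuildPd points PySem.Dict.empty
  let cheats := pathD.items.foldl (fun cheats pt => pvFfCheats pt.1 pathD cheats pdPoints)
    PySem.Dict.empty
  cheats.items

-- ===== PORT B =====
-- buckets[md].append(p): 0 ≤ md ≤ 20 is guaranteed by the guard, so List.set md.toNat
-- is exactly Python's in-range buckets[md] = … (no negative or out-of-range index occurs).
def pvBuckets (points : List (Int × Int)) (s : Int × Int) : List (List (Int × Int)) :=
  points.foldl (fun b p =>
    let md := |p.1 - s.1| + |p.2 - s.2|
    if p ≠ s ∧ md ≤ 20 then b.set md.toNat (b.getD md.toNat [] ++ [p]) else b)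
    (List.replicate 21 ([] : List (Int × Int)))

def find_cheats_by_time_20_alt (grid : List String) (path : List (Int × Int × Int)) : List (Int × Int) :=
  let pathD := pvPathDict path
  let points := pathD.keys
  let cheats := points.foldl (fun cheats s =>
    let ts := pathD.getD s 0
    let buckets := pvBuckets points s
    (PySem.List.pyRange 1 21 1).foldl (fun cheats d =>
      -- buckets[d] for d in range(1, 21) is always in range, so getD d.toNat is exact
      (buckets.getD d.toNat []).foldl (fun cheats p =>
        let tp := pathD.getD p 0
        if ts + d < tp then cheats.insert (tp - ts - d) (cheats.getD (tp - ts - d) 0 + 1)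
        else cheats) cheats) cheats) PySem.Dict.empty
  cheats.items

-- ===== PRECONDITION & SPEC =====
def Spec_find_cheats_by_time_20 (grid : List String) (path : List (Int × Int × Int)) (out : List (Int × Int)) : Prop := out = find_cheats_by_time_20_alt grid path
instance (grid : List String) (path : List (Int × Int × Int)) (out : List (Int × Int)) : Decidable (Spec_find_cheats_by_time_20 grid path out) := by unfold Spec_find_cheats_by_time_20; infer_instance

-- ===== CLAIM (what is proved, stated in full; the proofs are below) =====
def Claim_equal_find_cheats_by_time_20 : Prop := ∀ (grid : List String) (path : List (Int × Int × Int)), Dom_find_cheats_by_time_20 grid path → Spec_find_cheats_by_time_20 grid path (find_cheats_by_time_20 grid path)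

-- ===== LEMMAS AND PROOFS =====
def pvPdGet (pd : PySem.Dict (Int × Int) (PySem.Dict Int (List (Int × Int))))
    (s : Int × Int) (d : Int) : List (Int × Int) :=
  (pd.getD s PySem.Dict.empty).getD d []

theorem pvPdGet_pdAdd (pd : PySem.Dict (Int × Int) (PySem.Dict Int (List (Int × Int))))
    (a : Int × Int) (md : Int) (q s : Int × Int) (d : Int) :
    pvPdGet (pvPdAdd pd a md q) s d =
      pvPdGet pd s d ++ (if s = a ∧ d = md then [q] else []) := by
  by_cases h1 : s = a <;> by_cases h2 : d = md <;>
    simp [pvPdGet, pvPdAdd, PySem.Dict.getD_modify, h1, h2]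

theorem pvPdGet_innerFold (p s : Int × Int) (d : Int) :
    ∀ (t : List (Int × Int)) (pd : PySem.Dict (Int × Int) (PySem.Dict Int (List (Int × Int)))),
      p ∉ t → t.Nodup →
    pvPdGet (t.foldl (fun pd p2 =>
        pvPdAdd (pvPdAdd pd p (|p2.1 - p.1| + |p2.2 - p.2|) p2)
                p2 (|p2.1 - p.1| + |p2.2 - p.2|) p) pd) s d =
      pvPdGet pd s d ++
        (if s = p then t.filter (fun q => decide (|q.1 - p.1| + |q.2 - p.2| = d))
         else if s ∈ t ∧ |s.1 - p.1| + |s.2 - p.2| = d then [p] else []) := by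
  intro t
  induction t with
  | nil => intro pd _ _; simp
  | cons q t ih =>
    intro pd hp hnd
    have hpq : p ≠ q := by rintro rfl; exact hp (List.mem_cons_self)
    have hpt : p ∉ t := fun h => hp (List.mem_cons_of_mem _ h)
    have hqt : q ∉ t := (List.nodup_cons.mp hnd).1
    simp only [List.foldl_cons]
    rw [ih _ hpt (List.nodup_cons.mp hnd).2, pvPdGet_pdAdd, pvPdGet_pdAdd]
    simp only [List.append_assoc]
    congr 1
    by_cases hsp : s = p
    · subst hsp
      by_cases hd : d = |q.1 - s.1| + |q.2 - s.2| <;> simp [hd, hpq, List.filter_cons, eq_comm]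
    · by_cases hsq : s = q
      · subst hsq
        simp [hsp, hqt, List.filter_cons, eq_comm]
      · simp [hsp, hsq, List.filter_cons]

def pvCand (points : List (Int × Int)) (s : Int × Int) (d : Int) : List (Int × Int) :=
  points.filter (fun p => decide (p ≠ s ∧ |p.1 - s.1| + |p.2 - s.2| = d))

theorem pvPdGet_buildPd (s : Int × Int) (d : Int) :
    ∀ (points : List (Int × Int)) (pd : PySem.Dict (Int × Int) (PySem.Dict Int (List (Int × Int)))),
      points.Nodup →
    pvPdGet (pvBuildPd points pd) s d =
      pvPdGet pd s d ++ (if s ∈ points then pvCand points s d else []) := by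
  intro points
  induction points with
  | nil => intro pd _; simp [pvBuildPd, pvCand]
  | cons p t ih =>
    intro pd hnd
    have hpt : p ∉ t := (List.nodup_cons.mp hnd).1
    simp only [pvBuildPd]
    rw [ih _ (List.nodup_cons.mp hnd).2,
        pvPdGet_innerFold p s d t pd hpt (List.nodup_cons.mp hnd).2]
    simp only [List.append_assoc]
    congr 1
    by_cases hsp : s = p
    · subst hsp
      have : t.filter (fun q => decide (|q.1 - s.1| + |q.2 - s.2| = d)) = pvCand t s d := by
        apply List.filter_congr
        intro q hq
        have hqs : q ≠ s := fun h => hpt (h ▸ hq)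
        simp [pvCand, hqs]
      simp [hpt, pvCand, List.filter_cons, this]
    · by_cases hst : s ∈ t
      · by_cases hmd : |p.1 - s.1| + |p.2 - s.2| = d
        · simp [hsp, hst, hmd, pvCand, List.filter_cons, Ne.symm hsp, abs_sub_comm s.1 p.1,
            abs_sub_comm s.2 p.2]
        · simp [hsp, hst, hmd, pvCand, List.filter_cons, Ne.symm hsp, abs_sub_comm s.1 p.1,
            abs_sub_comm s.2 p.2]
      · simp [hsp, hst, pvCand]

theorem pvBuckets_aux (s : Int × Int) (d : Int) (h1 : 1 ≤ d) (h2 : d ≤ 20) :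
    ∀ (points : List (Int × Int)) (acc : List (List (Int × Int))), acc.length = 21 →
    (points.foldl (fun b p =>
      if p ≠ s ∧ |p.1 - s.1| + |p.2 - s.2| ≤ 20 then
        b.set (|p.1 - s.1| + |p.2 - s.2|).toNat (b.getD (|p.1 - s.1| + |p.2 - s.2|).toNat [] ++ [p])
      else b) acc).getD d.toNat []
    = acc.getD d.toNat [] ++ pvCand points s d := by
  intro points
  induction points with
  | nil => intro acc _; simp [pvCand]
  | cons p t ih =>
    intro acc hlen
    have hdn : d.toNat < acc.length := by omega
    simp only [List.foldl_cons]
    by_cases hg : p ≠ s ∧ |p.1 - s.1| + |p.2 - s.2| ≤ 20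
    · rw [if_pos hg, ih _ (by simp [hlen])]
      have hm0 : (0:Int) ≤ |p.1 - s.1| + |p.2 - s.2| := by positivity
      by_cases hd : |p.1 - s.1| + |p.2 - s.2| = d
      · have : (acc.set (|p.1 - s.1| + |p.2 - s.2|).toNat
            (acc.getD (|p.1 - s.1| + |p.2 - s.2|).toNat [] ++ [p])).getD d.toNat []
            = acc.getD d.toNat [] ++ [p] := by
          rw [hd]
          simp [List.getD_eq_getElem?_getD, List.getElem?_set, hdn]
        rw [this]
        simp [pvCand, List.filter_cons, hg.1, hd]
      · have hne : (|p.1 - s.1| + |p.2 - s.2|).toNat ≠ d.toNat := by omega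
        have : (acc.set (|p.1 - s.1| + |p.2 - s.2|).toNat
            (acc.getD (|p.1 - s.1| + |p.2 - s.2|).toNat [] ++ [p])).getD d.toNat []
            = acc.getD d.toNat [] := by
          simp [List.getD_eq_getElem?_getD, List.getElem?_set, hne]
        rw [this]
        simp [pvCand, List.filter_cons, hd]
    · rw [if_neg hg, ih _ hlen]
      have : ¬ (p ≠ s ∧ |p.1 - s.1| + |p.2 - s.2| = d) := by
        rintro ⟨hps, hmd⟩; exact hg ⟨hps, by omega⟩
      simp [pvCand, List.filter_cons, this]

theorem pvBuckets_getD (points : List (Int × Int)) (s : Int × Int) (d : Int)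
    (h1 : 1 ≤ d) (h2 : d ≤ 20) :
    (pvBuckets points s).getD d.toNat [] = pvCand points s d := by
  have h := pvBuckets_aux s d h1 h2 points (List.replicate 21 []) (by simp)
  have h2' : (List.replicate 21 ([] : List (Int × Int))).getD d.toNat [] = [] := by
    simp only [List.getD_eq_getElem?_getD, List.getElem?_replicate]
    split_ifs <;> rfl
  rw [h2'] at h
  exact h

def pvBodyB (pathD : PySem.Dict (Int × Int) Int) (s : Int × Int)
    (cheats : PySem.Dict Int Int) : PySem.Dict Int Int :=
  (PySem.List.pyRange 1 21 1).foldl (fun cheats d =>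
    ((pvBuckets pathD.keys s).getD d.toNat []).foldl (fun cheats p =>
      if pathD.getD s 0 + d < pathD.getD p 0 then
        cheats.insert (pathD.getD p 0 - pathD.getD s 0 - d)
          (cheats.getD (pathD.getD p 0 - pathD.getD s 0 - d) 0 + 1)
      else cheats) cheats) cheats

theorem pvFfCheats_eq (pathD : PySem.Dict (Int × Int) Int) (s : Int × Int)
    (c : PySem.Dict Int Int) (hs : s ∈ pathD.keys) (hnd : pathD.keys.Nodup) :
    pvFfCheats s pathD c (pvBuildPd pathD.keys PySem.Dict.empty) = pvBodyB pathD s c := by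
  unfold pvFfCheats pvBodyB
  apply PySem.List.foldl_congr_mem
  intro acc d hd
  rw [PySem.List.mem_pyRange_one] at hd
  have hA : ((pvBuildPd pathD.keys PySem.Dict.empty).getD s PySem.Dict.empty).getD d []
      = pvCand pathD.keys s d := by
    have := pvPdGet_buildPd s d pathD.keys PySem.Dict.empty hnd
    rw [if_pos hs] at this
    simpa [pvPdGet] using this
  rw [hA, pvBuckets_getD pathD.keys s d (by omega) (by omega)]
  rfl

theorem pvMainDict (pathD : PySem.Dict (Int × Int) Int) (hnd : pathD.keys.Nodup) :
    pathD.items.foldl (fun cheats pt =>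
        pvFfCheats pt.1 pathD cheats (pvBuildPd pathD.keys PySem.Dict.empty)) PySem.Dict.empty
    = pathD.keys.foldl (fun cheats s => pvBodyB pathD s cheats) PySem.Dict.empty := by
  calc pathD.items.foldl (fun cheats pt =>
          pvFfCheats pt.1 pathD cheats (pvBuildPd pathD.keys PySem.Dict.empty)) PySem.Dict.empty
      = pathD.items.foldl (fun cheats pt => pvBodyB pathD pt.1 cheats) PySem.Dict.empty := by
        apply PySem.List.foldl_congr_mem
        intro acc pt hpt
        exact pvFfCheats_eq pathD pt.1 acc (List.mem_map_of_mem hpt) hnd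
    _ = (pathD.items.map (fun pt => pt.1)).foldl
          (fun cheats s => pvBodyB pathD s cheats) PySem.Dict.empty :=
        (List.foldl_map (f := fun (pt : (Int × Int) × Int) => pt.1)
          (g := fun cheats s => pvBodyB pathD s cheats)
          (l := pathD.items) (init := PySem.Dict.empty)).symm
    _ = pathD.keys.foldl (fun cheats s => pvBodyB pathD s cheats) PySem.Dict.empty := rfl

-- ===== VERDICT (by name: the statement is the Claim_ definition above) =====
theorem find_cheats_by_time_20_spec : Claim_equal_find_cheats_by_time_20 := by
  intro grid path _
  unfold Spec_find_cheats_by_time_20 find_cheats_by_time_20 find_cheats_by_time_20_alt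
  exact congrArg PySem.Dict.items
    (pvMainDict (pvPathDict path) (PySem.Dict.nodup_keys_ofList _))
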